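-- pv_equiv track=rewrite | github.com/zhe-tong/COMP9021 | quiz_1/quiz_ZHE.py | nonzero
-- ===== SOURCE A (Python) =====
-- def nonzero(values):
--     temp = 5
--     res = []
--     sign1 = ' '
--     sign2 = '-'
--     #res.append(sign2 * values[0])
--     for j in range(len(values)):
--         if values[j] != 0:
--             res.append(sign1 * temp + sign2 * values[j])
--             temp = temp + values[j]
--     return res
-- ===== SOURCE B (Python) =====
-- def nonzero(values):
--     nonzeros = [v for v in values if v != 0]
--     offsets = []
--     total = 5
--     for v in nonzeros:
--         offsets.append(total)
--         total += v
--     return [' ' * off + '-' * v for off, v in zip(offsets, nonzeros)]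
-- ===== Notes on version B (the rewrite author's own statement) =====
-- stated objective: alternative
-- what changed: Replaces A's single index loop with a fused running-total accumulator by three separate passes: filter the nonzero values, build an exclusive prefix-sum offset table seeded at 5, then format each (offset, value) pair with zip.
import Mathlib
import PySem

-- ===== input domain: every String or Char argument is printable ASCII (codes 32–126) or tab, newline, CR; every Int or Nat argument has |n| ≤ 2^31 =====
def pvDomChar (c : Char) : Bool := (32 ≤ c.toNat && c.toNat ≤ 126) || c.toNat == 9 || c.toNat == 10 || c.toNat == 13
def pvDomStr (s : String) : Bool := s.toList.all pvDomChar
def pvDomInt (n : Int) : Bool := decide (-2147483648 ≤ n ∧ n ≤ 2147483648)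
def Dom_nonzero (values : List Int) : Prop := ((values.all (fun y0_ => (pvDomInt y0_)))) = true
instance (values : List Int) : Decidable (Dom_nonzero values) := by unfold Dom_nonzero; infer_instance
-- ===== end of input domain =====

-- B separates A's fused running-total loop into filter / exclusive-prefix-sum / format passes (objective: alternative decomposition, same cost).

-- ===== PORT A =====
-- literal port: for j in range(len(values)) with state (temp, res); ' '*temp and '-'*v via pyRepeat (empty for nonpositive counts, as in Python)
def nonzero (values : List Int) : List String :=
  ((PySem.List.pyRange 0 (PySem.List.len values) 1).foldl
    (fun (st : Int × List String) j =>
      if PySem.List.pyGetD values j 0 ≠ 0 then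
        (st.1 + PySem.List.pyGetD values j 0,
         st.2 ++ [String.ofList (PySem.List.pyRepeat [' '] st.1 ++
                                 PySem.List.pyRepeat ['-'] (PySem.List.pyGetD values j 0))])
      else st)
    (5, [])).2

-- ===== PORT B =====
-- offsets loop of Source B: state (total, offsets); returns the offsets table
def nonzeroAltOffsets : List Int → Int → List Int
  | [], _ => []
  | v :: vs, total => total :: nonzeroAltOffsets vs (total + v)

def nonzero_alt (values : List Int) : List String :=
  let nonzeros := values.filter (fun v => v ≠ 0)
  let offsets := nonzeroAltOffsets nonzeros 5
  (offsets.zip nonzeros).map (fun p =>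
    String.ofList (PySem.List.pyRepeat [' '] p.1 ++ PySem.List.pyRepeat ['-'] p.2))

-- ===== PRECONDITION & SPEC =====
def Spec_nonzero (values : List Int) (out : List String) : Prop := out = nonzero_alt values
instance (values : List Int) (out : List String) : Decidable (Spec_nonzero values out) := by unfold Spec_nonzero; infer_instance

-- ===== CLAIM (what is proved, stated in full; the proofs are below) =====
def Claim_equal_nonzero : Prop := ∀ (values : List Int), Dom_nonzero values → Spec_nonzero values (nonzero values)

-- ===== LEMMAS AND PROOFS =====

theorem nonzero_fold_invariant (vs : List Int) : ∀ (temp : Int) (res : List String),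
    (vs.foldl
      (fun (st : Int × List String) v =>
        if v ≠ 0 then
          (st.1 + v,
           st.2 ++ [String.ofList (PySem.List.pyRepeat [' '] st.1 ++ PySem.List.pyRepeat ['-'] v)])
        else st)
      (temp, res)).2
    = res ++ ((nonzeroAltOffsets (vs.filter (fun v => v ≠ 0)) temp).zip
              (vs.filter (fun v => v ≠ 0))).map (fun p =>
        String.ofList (PySem.List.pyRepeat [' '] p.1 ++ PySem.List.pyRepeat ['-'] p.2)) := by
  induction vs with
  | nil => simp
  | cons v vs ih =>
    intro temp res
    rw [List.foldl_cons]
    by_cases hv : v = 0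
    · rw [if_neg (by simp [hv]), ih, List.filter_cons, if_neg (by simp [hv])]
    · rw [if_pos hv, ih, List.filter_cons, if_pos (by simpa using hv)]
      simp [nonzeroAltOffsets]

-- ===== VERDICT (by name: the statement is the Claim_ definition above) =====
theorem nonzero_spec : Claim_equal_nonzero := by
  intro values _
  unfold Spec_nonzero nonzero nonzero_alt
  rw [PySem.List.foldl_pyRange_zero_pyGetD values 0
    (fun (st : Int × List String) v =>
      if v ≠ 0 then
        (st.1 + v,
         st.2 ++ [String.ofList (PySem.List.pyRepeat [' '] st.1 ++ PySem.List.pyRepeat ['-'] v)])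
      else st) (5, [])]
  simpa using nonzero_fold_invariant values 5 []
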